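-- pv_equiv track=rewrite | github.com/Yeongbi-Na/STUDY | Python/ex-08-sales-summary-main/3practice.py | sales_summary
-- ===== SOURCE A (Python) =====
-- def sales_summary(data):
--     temp_rank=list(range(1,len(data)+1))
--     temp_values=[x[1] for x in data]
--     temp_keys=[x[0] for x in data]
--     for i in range(len(data)-1):
--         if temp_values[i]==temp_values[i+1]:
--             temp_rank[i+1]=temp_rank[i]
--
--     result=list(zip(temp_keys,temp_values, temp_rank))
--     return result
-- ===== SOURCE B (Python) =====
-- def sales_summary(data):
--     # Run-based ranking: scan each maximal run of equal consecutive values,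
--     # give every item in the run the rank of the run's starting position + 1.
--     result = []
--     pos = 0
--     n = len(data)
--     while pos < n:
--         v = data[pos][1]
--         end = pos + 1
--         while end < n and data[end][1] == v:
--             end += 1
--         rank = pos + 1
--         for item in data[pos:end]:
--             result.append((item[0], item[1], rank))
--         pos = end
--     return result
-- ===== Notes on version B (the rewrite author's own statement) =====
-- stated objective: alternative
-- what changed: A builds a 1..n rank array and propagates ranks across adjacent equal values in an index loop over three parallel lists before zipping; B scans the maximal runs of equal consecutive values directly and ranks every item of a run by the run's start position + 1.
import Mathlib
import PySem

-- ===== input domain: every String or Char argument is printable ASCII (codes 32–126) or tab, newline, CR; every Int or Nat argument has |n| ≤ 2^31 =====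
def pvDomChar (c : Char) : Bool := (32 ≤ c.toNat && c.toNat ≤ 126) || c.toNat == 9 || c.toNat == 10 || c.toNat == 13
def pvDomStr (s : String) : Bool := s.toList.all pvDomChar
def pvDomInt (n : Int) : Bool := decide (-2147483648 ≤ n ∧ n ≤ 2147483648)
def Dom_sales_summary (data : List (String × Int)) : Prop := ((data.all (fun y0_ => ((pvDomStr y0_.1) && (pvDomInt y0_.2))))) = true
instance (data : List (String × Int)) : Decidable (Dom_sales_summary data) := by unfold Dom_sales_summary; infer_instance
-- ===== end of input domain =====

-- B replaces A's adjacent-pair rank propagation through an index array by a direct scan of the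
-- maximal runs of equal consecutive values, ranking each run by its start position (objective:
-- alternative decomposition; same asymptotic cost).

-- ===== PORT A =====
-- Literal port of A. The loop indices i and i+1 are always in range (0 ≤ i ≤ n-2), so the
-- total forms pyGetD/pySetD are exact here.
def sales_summary (data : List (String × Int)) : List (String × Int × Int) :=
  let temp_rank : List Int := PySem.List.pyRange 1 ((data.length : Int) + 1) 1
  let temp_values : List Int := data.map (fun x => x.2)
  let temp_keys : List String := data.map (fun x => x.1)
  let temp_rank :=
    (PySem.List.pyRange 0 ((data.length : Int) - 1) 1).foldl
      (fun r i =>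
        if PySem.List.pyGetD temp_values i 0 = PySem.List.pyGetD temp_values (i + 1) 0 then
          PySem.List.pySetD r (i + 1) (PySem.List.pyGetD r i 0)
        else r)
      temp_rank
  temp_keys.zip (temp_values.zip temp_rank)

-- ===== PORT B =====
-- Port of B's outer while loop: peel the maximal run of values equal to the head's value
-- (Source B's inner `while end < n and data[end][1] == v` scan), emit the run with rank pos+1,
-- continue after the run.
def salesRun : Int → List (String × Int) → List (String × Int × Int)
  | _, [] => []
  | pos, (k, v) :: rest =>
    let run := rest.takeWhile (fun x => x.2 == v)
    let rest' := rest.dropWhile (fun x => x.2 == v)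
    let rank := pos + 1
    ((k, v, rank) :: run.map (fun x => (x.1, x.2, rank))) ++
      salesRun (pos + 1 + run.length) rest'
  termination_by _ l => l.length
  decreasing_by
    simp only [List.length_cons]
    exact Nat.lt_succ_of_le (List.length_dropWhile_le _ _)

def sales_summary_alt (data : List (String × Int)) : List (String × Int × Int) :=
  salesRun 0 data

-- ===== PRECONDITION & SPEC =====
def Spec_sales_summary (data : List (String × Int)) (out : List (String × Int × Int)) : Prop := out = sales_summary_alt data
instance (data : List (String × Int)) (out : List (String × Int × Int)) : Decidable (Spec_sales_summary data out) := by unfold Spec_sales_summary; infer_instance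

-- ===== CLAIM (what is proved, stated in full; the proofs are below) =====
def Claim_equal_sales_summary : Prop := ∀ (data : List (String × Int)), Dom_sales_summary data → Spec_sales_summary data (sales_summary data)

-- ===== LEMMAS AND PROOFS =====

-- Rank sequence of a left-to-right scan: prev value v, prev rank r, current 0-based position pos.
def rks (v r pos : Int) : List Int → List Int
  | [] => []
  | x :: xs => (if x = v then r else pos + 1) :: rks x (if x = v then r else pos + 1) (pos + 1) xs

-- The same scan producing the result triples directly; both programs are proved equal to it.
def cgo (v r pos : Int) : List (String × Int) → List (String × Int × Int)
  | [] => []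
  | (k, x) :: xs => (k, x, if x = v then r else pos + 1) ::
      cgo x (if x = v then r else pos + 1) (pos + 1) xs

theorem length_rks (v r pos : Int) (xs : List Int) : (rks v r pos xs).length = xs.length := by
  induction xs generalizing v r pos with
  | nil => rfl
  | cons x xs ih => simp [rks, ih]

theorem rks_snoc (v r pos : Int) (xs : List Int) (y : Int) :
    rks v r pos (xs ++ [y]) =
      rks v r pos xs ++
        [if y = xs.getLastD v then (rks v r pos xs).getLastD r else pos + xs.length + 1] := by
  induction xs generalizing v r pos with
  | nil => simp [rks]
  | cons x xs ih =>
    simp only [List.cons_append, rks, List.getLastD_cons, ih, List.length_cons]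
    have : pos + 1 + (xs.length : Int) + 1 = pos + ((xs.length : Int) + 1) + 1 := by ring
    rw [this]
    push_cast
    rfl

theorem zip_rks_eq_cgo (data : List (String × Int)) (v r pos : Int) :
    (data.map (fun x => x.1)).zip ((data.map (fun x => x.2)).zip (rks v r pos (data.map (fun x => x.2)))) =
      cgo v r pos data := by
  induction data generalizing v r pos with
  | nil => rfl
  | cons p data ih => simp [rks, cgo, ih]

theorem cgo_run (t d : List (String × Int)) (v r pos : Int) (ht : ∀ e ∈ t, e.2 = v) :
    cgo v r pos (t ++ d) = t.map (fun y => (y.1, y.2, r)) ++ cgo v r (pos + t.length) d := by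
  induction t generalizing pos with
  | nil => simp
  | cons e t ih =>
    obtain ⟨k, x⟩ := e
    have hx : x = v := ht (k, x) (by simp)
    subst hx
    simp only [List.cons_append, cgo, List.map_cons, List.length_cons, if_true]
    rw [ih _ (fun e he => ht e (by simp [he]))]
    have harg : pos + ((t.length : Int) + 1) = pos + 1 + t.length := by ring
    push_cast
    rw [harg]

theorem getLastD_take (vals : List Int) (m : Nat) (hm : m < vals.length) (d : Int) :
    (vals.take (m + 1)).getLastD d = vals[m] := by
  have hlen : (vals.take (m + 1)).length = m + 1 := by rw [List.length_take]; omega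
  rw [List.getLastD_eq_getLast?, List.getLast?_eq_getElem?, hlen]
  simp only [Nat.add_sub_cancel]
  rw [List.getElem?_take_of_lt (by omega), List.getElem?_eq_getElem hm]
  rfl

theorem getLastD_eq_getD (l : List Int) (m : Nat) (h : l.length = m + 1) (d e : Int) :
    l.getLastD d = l.getD m e := by
  rw [List.getLastD_eq_getLast?, List.getLast?_eq_getElem?, List.getD_eq_getElem?_getD, h]
  simp [List.getElem?_eq_getElem (by omega : m < l.length)]

-- Invariant of A's loop: after the first m iterations the rank array is the scan ranks of the
-- first m+1 values followed by the untouched initial ranks.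
theorem foldA (vals : List Int) (m : Nat) (hm : m < vals.length) :
    (List.range m).foldl
      (fun r (i : Nat) =>
        if PySem.List.pyGetD vals (i : Int) 0 = PySem.List.pyGetD vals ((i : Int) + 1) 0 then
          PySem.List.pySetD r ((i : Int) + 1) (PySem.List.pyGetD r (i : Int) 0)
        else r)
      (PySem.List.pyRange 1 ((vals.length : Int) + 1) 1)
    = rks 0 1 0 (vals.take (m + 1)) ++
        (PySem.List.pyRange 1 ((vals.length : Int) + 1) 1).drop (m + 1) := by
  induction m with
  | zero =>
    cases vals with
    | nil => simp at hm
    | cons a vs =>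
      rw [List.range_zero, List.foldl_nil, PySem.List.pyRange_one_cons (by omega)]
      simp [rks]
  | succ m ih =>
    rw [List.range_succ, List.foldl_append, List.foldl_cons, List.foldl_nil,
      ih (by omega)]
    have hc1 : ((m : Int) + 1) = ((m + 1 : Nat) : Int) := by push_cast; ring
    rw [hc1]
    simp only [PySem.List.pyGetD_natCast, PySem.List.pySetD_natCast]
    set L := rks 0 1 0 (vals.take (m + 1)) with hL
    have hLlen : L.length = m + 1 := by
      rw [hL, length_rks, List.length_take]; omega
    have hRlen : (PySem.List.pyRange 1 ((vals.length : Int) + 1) 1).length = vals.length := by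
      rw [PySem.List.length_pyRange_one]; omega
    have hdrop : (PySem.List.pyRange 1 ((vals.length : Int) + 1) 1).drop (m + 1)
        = (1 + ((m + 1 : Nat) : Int)) :: (PySem.List.pyRange 1 ((vals.length : Int) + 1) 1).drop (m + 2) := by
      rw [List.drop_eq_getElem_cons (by omega)]
      congr 1
      exact PySem.List.getElem_pyRange_one _ _ _ _
    have htake : vals.take (m + 1 + 1) = vals.take (m + 1) ++ [vals[m + 1]] := by
      rw [List.take_add_one, List.getElem?_eq_getElem hm]
      rfl
    have hrks : rks 0 1 0 (vals.take (m + 1 + 1))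
        = L ++ [if vals[m + 1] = (vals.take (m + 1)).getLastD 0 then L.getLastD 1
                else 0 + ((vals.take (m + 1)).length : Int) + 1] := by
      rw [htake, rks_snoc]
    have hgetL : vals.getD (m + 1) 0 = vals[m + 1] := by
      rw [List.getD_eq_getElem?_getD, List.getElem?_eq_getElem hm]; rfl
    have hgetm : vals.getD m 0 = vals[m] := by
      rw [List.getD_eq_getElem?_getD, List.getElem?_eq_getElem (by omega : m < vals.length)]; rfl
    have hEget : (L ++ (PySem.List.pyRange 1 ((vals.length : Int) + 1) 1).drop (m + 1)).getD m 0
        = L.getLastD 1 := by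
      rw [List.getD_eq_getElem?_getD, List.getElem?_append_left (by omega),
        ← List.getD_eq_getElem?_getD, (getLastD_eq_getD L m hLlen 1 0)]
    by_cases hc : vals.getD m 0 = vals.getD (m + 1) 0
    · rw [if_pos hc, hrks]
      rw [if_pos (by rw [getLastD_take vals m (by omega), ← hgetm, ← hgetL]; exact hc.symm)]
      rw [hEget, List.set_append_right _ _ (by omega), hdrop]
      have : m + 1 - L.length = 0 := by omega
      rw [this, List.set_cons_zero, List.append_assoc]
      rfl
    · rw [if_neg hc, hrks]
      rw [if_neg (by rw [getLastD_take vals m (by omega), ← hgetm, ← hgetL]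
                     exact fun h => hc h.symm)]
      rw [hdrop, List.append_assoc]
      congr 2
      rw [List.length_take]
      push_cast
      omega

theorem A_eq (data : List (String × Int)) : sales_summary data = cgo 0 1 0 data := by
  rw [← zip_rks_eq_cgo]
  unfold sales_summary
  dsimp only
  cases data with
  | nil => simp [PySem.List.pyRange_one_eq_nil]
  | cons p rest =>
    rw [PySem.List.pyRange_one 0 _, List.foldl_map]
    simp only [zero_add]
    have hlen : ((((p :: rest).length : Int) - 1 - 0)).toNat = rest.length := by simp
    rw [hlen]
    have hfa := foldA ((p :: rest).map (fun x => x.2)) rest.length (by simp)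
    simp only [List.length_map] at hfa
    rw [hfa]
    rw [show rest.length + 1 = ((p :: rest).map (fun x => x.2)).length from by simp,
      List.take_length,
      List.drop_of_length_le (by rw [PySem.List.length_pyRange_one]; simp),
      List.append_nil]

theorem B_eq (l : List (String × Int)) (v r pos : Int)
    (h : ∀ y ∈ l.head?, y.2 = v → r = pos + 1) : salesRun pos l = cgo v r pos l := by
  induction hl : l.length using Nat.strong_induction_on generalizing l v r pos with
  | _ n ih =>
    match l with
    | [] => simp [salesRun, cgo]
    | (k, x) :: rest =>
      have hr : (if x = v then r else pos + 1) = pos + 1 := by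
        by_cases hxv : x = v
        · simpa [hxv] using h (k, x) (by simp)
        · simp [hxv]
      rw [salesRun]
      simp only [cgo, hr]
      have hsplit : rest = rest.takeWhile (fun y => y.2 == x) ++ rest.dropWhile (fun y => y.2 == x) :=
        (List.takeWhile_append_dropWhile).symm
      conv_rhs => rw [hsplit]
      rw [cgo_run _ _ _ _ _ (by intro e he; simpa using (List.mem_takeWhile_imp he))]
      simp only [List.cons_append, List.cons.injEq, true_and]
      congr 1
      apply ih ((rest.dropWhile (fun y => y.2 == x)).length)
        (by subst hl; simp only [List.length_cons]
            exact Nat.lt_succ_of_le (List.length_dropWhile_le _ _))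
      · intro y hy hyx
        have := List.head?_dropWhile_not (fun y => y.2 == x) rest
        rw [Option.mem_def] at hy
        rw [hy] at this
        simp [hyx] at this
      · rfl

-- ===== VERDICT (by name: the statement is the Claim_ definition above) =====
theorem sales_summary_spec : Claim_equal_sales_summary := by
  intro data _
  unfold Spec_sales_summary sales_summary_alt
  rw [A_eq, B_eq]
  intro y hy hv
  rfl
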